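-- pv_equiv track=rewrite | github.com/TarhunchiKKK/oks | Lab4/src/bitstaffing.py | split_on_packages
-- ===== SOURCE A (Python) =====
-- def split_on_packages(data: str) -> list[str]:
--     # splited: list[str] = []
--     # length: int = len(data)
--     # step: int = 0
--     #
--     # if length % 20 == 0:
--     #     step = 20
--     # else:
--     #     step = 19
--     # start: int = 0
--     # while start < length:
--     #     if start + step:
--     #         splited.append(data[start::1])
--     #         break
--     #     splited.append(data[start:start + step:1])
--     #     start += step
--     # return splited
--
--     splited: list[str] = []
--     length: int = len(data)
--     step: int = 8
--
--     start: int = 0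
--     while True:
--         position: int = data.find('00000001', start)
--         if position == -1:
--             break
--
--         start = position
--         end: int = data.find('00000001', start + step * 2)
--         if end == -1:
--             splited.append(data[start::1])
--             break
--
--         if end >= length:
--             break
--
--         splited.append(data[start:end:1])
--
--         start = end
--
--     return splited
-- ===== SOURCE B (Python) =====
-- def split_on_packages(data: str) -> list[str]:
--     marker = '00000001'
--     occs = [i for i in range(len(data)) if data[i:i + 8] == marker]
--     if not occs:
--         return []
--     packages = []
--     cur = occs[0]
--     rest = occs
--     while True:
--         rest = [i for i in rest if i >= cur + 16]
--         if not rest: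
--             packages.append(data[cur:])
--             return packages
--         packages.append(data[cur:rest[0]])
--         cur = rest[0]
-- ===== Notes on version B (the rewrite author's own statement) =====
-- stated objective: alternative
-- what changed: Instead of A's repeated str.find calls inside a while-True loop, B collects every marker position in one scan and then walks that index list greedily, taking at each step the first listed position at least 16 characters ahead.
import Mathlib
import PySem

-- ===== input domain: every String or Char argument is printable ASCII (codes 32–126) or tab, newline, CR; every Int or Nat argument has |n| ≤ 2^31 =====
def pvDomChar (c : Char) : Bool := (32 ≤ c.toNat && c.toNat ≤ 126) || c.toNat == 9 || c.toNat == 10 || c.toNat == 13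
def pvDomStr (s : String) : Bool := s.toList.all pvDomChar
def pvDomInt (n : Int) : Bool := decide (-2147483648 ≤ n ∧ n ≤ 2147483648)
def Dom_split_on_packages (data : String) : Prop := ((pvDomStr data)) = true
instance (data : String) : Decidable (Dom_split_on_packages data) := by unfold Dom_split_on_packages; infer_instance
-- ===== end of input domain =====

-- B re-implements the marker splitting with a different decomposition: it first collects all
-- marker positions in one scan and then walks that index list greedily; same value, no speed claim.

-- ===== PORT A =====
-- A's `while True` loop; the fuel counter `data.length + 1` is a totality guard only
-- (each iteration moves `start` forward by at least 16 while `start < len(data)`, so the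
-- fuel never runs out; the equivalence proof goes through the fuel bound).
-- `data[start::1]` / `data[start:end:1]` carry Python's default step 1, so they are
-- ported as `PySem.Str.slice` (exact for step 1).
def splitLoopA (data : String) (fuel : Nat) (start : Int) : List String :=
  match fuel with
  | 0 => []
  | fuel + 1 =>
    let position := PySem.Str.findFrom data "00000001" start
    if position = -1 then []
    else
      let start := position
      let e := PySem.Str.findFrom data "00000001" (start + 8 * 2)
      if e = -1 then [PySem.Str.slice data (some start) none]
      else if PySem.Str.len data ≤ e then []
      else PySem.Str.slice data (some start) (some e) :: splitLoopA data fuel e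

def split_on_packages (data : String) : List String :=
  splitLoopA data (data.toList.length + 1) 0

-- ===== PORT B =====
-- B: all marker positions `occs` in one scan, then a greedy walk over that index list.
def splitOccs (data : String) : List Int :=
  (PySem.List.pyRange 0 (PySem.Str.len data)).filter
    (fun i => PySem.Str.slice data (some i) (some (i + 8)) == "00000001")

def splitEmit (data : String) (cur : Int) (rest : List Int) : List String :=
  match h : rest.filter (fun i => cur + 16 ≤ i) with
  | [] => [PySem.Str.slice data (some cur) none]
  | j :: rest' => PySem.Str.slice data (some cur) (some j) :: splitEmit data j rest'
termination_by rest.length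
decreasing_by
  have h1 := List.length_filter_le (fun i => cur + 16 ≤ i) rest
  rw [h] at h1
  simp at h1
  omega

def split_on_packages_alt (data : String) : List String :=
  match splitOccs data with
  | [] => []
  | c :: _ => splitEmit data c (splitOccs data)

-- ===== PRECONDITION & SPEC =====
def Spec_split_on_packages (data : String) (out : List String) : Prop := out = split_on_packages_alt data
instance (data : String) (out : List String) : Decidable (Spec_split_on_packages data out) := by unfold Spec_split_on_packages; infer_instance

-- ===== CLAIM (what is proved, stated in full; the proofs are below) =====
def Claim_equal_split_on_packages : Prop := ∀ (data : String), Dom_split_on_packages data → Spec_split_on_packages data (split_on_packages data)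

-- ===== LEMMAS AND PROOFS =====

-- the marker as a character list (proof-side abbreviation only)
def mrkL : List Char := "00000001".toList

-- membership in B's occurrence list
theorem mem_splitOccs (data : String) (j : Int) :
    j ∈ splitOccs data ↔ 0 ≤ j ∧ j < data.toList.length ∧ mrkL <+: data.toList.drop j.toNat := by
  unfold splitOccs
  rw [List.mem_filter, PySem.List.mem_pyRange_one, PySem.Str.len_eq]
  constructor
  · rintro ⟨⟨h0, hlt⟩, hb⟩
    refine ⟨h0, hlt, ?_⟩
    rw [beq_iff_eq] at hb
    have : PySem.Chars.slice data.toList (some j) (some (j + 8)) = mrkL := by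
      have := congrArg String.toList hb
      simpa [PySem.Str.slice, String.toList_ofList, mrkL] using this
    rw [PySem.Chars.slice, PySem.List.slice_toNat _ h0 (by omega)] at this
    have h8 : (j + 8).toNat - j.toNat = 8 := by omega
    rw [h8] at this
    rw [List.prefix_iff_eq_take]
    simpa [mrkL] using this.symm
  · rintro ⟨h0, hlt, hp⟩
    refine ⟨⟨h0, hlt⟩, ?_⟩
    rw [beq_iff_eq]
    rw [List.prefix_iff_eq_take] at hp
    have : PySem.Chars.slice data.toList (some j) (some (j + 8)) = mrkL := by
      rw [PySem.Chars.slice, PySem.List.slice_toNat _ h0 (by omega)]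
      have h8 : (j + 8).toNat - j.toNat = 8 := by omega
      rw [h8]
      simpa [mrkL] using hp.symm
    apply String.ext  -- String.ofList (...) = "00000001" from toList equality
    simpa [PySem.Str.slice, String.toList_ofList, mrkL] using this

-- B's occurrence list is strictly increasing
theorem splitOccs_sorted (data : String) : (splitOccs data).Pairwise (· < ·) := by
  unfold splitOccs
  exact (PySem.List.pairwise_lt_pyRange_one 0 _).filter _

-- head of a filtered sorted list is its least element above the bound
theorem headD_filter_sorted (l : List Int) (k x : Int) (hs : l.Pairwise (· < ·))
    (hx : x ∈ l) (hkx : k ≤ x) (hmin : ∀ y ∈ l, k ≤ y → x ≤ y) :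
    (l.filter (fun i => k ≤ i)).headD (-1) = x := by
  induction l with
  | nil => simp at hx
  | cons h t ih =>
    rw [List.pairwise_cons] at hs
    by_cases hkh : k ≤ h
    · have hxh : x ≤ h := hmin h (List.mem_cons_self) hkh
      have : x = h := by
        rcases List.mem_cons.mp hx with rfl | hxt
        · rfl
        · exact absurd (hs.1 x hxt) (by omega)
      subst this
      simp [hkh]
    · rcases List.mem_cons.mp hx with rfl | hxt
      · omega
      · simp only [List.filter_cons, hkh, decide_false]
        exact ih hs.2 hxt (fun y hy hky => hmin y (List.mem_cons_of_mem _ hy) hky)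

-- `find(marker, k)` is the head of the occurrence list filtered at `k`
theorem findFrom_eq_headD (data : String) (k : Nat) (hk : k ≤ data.toList.length) :
    PySem.Str.findFrom data "00000001" (k : Int) =
      ((splitOccs data).filter (fun i => (k : Int) ≤ i)).headD (-1) := by
  rw [PySem.Str.findFrom_eq]
  have hm : ("00000001" : String).toList = mrkL := rfl
  by_cases hneg : PySem.Chars.findFrom data.toList "00000001".toList (k : Int) = -1
  · rw [hneg]
    have hni := (PySem.Chars.findFrom_natCast_eq_neg_one_iff data.toList "00000001".toList k hk).mp hneg
    have : (splitOccs data).filter (fun i => (k : Int) ≤ i) = [] := by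
      rw [List.filter_eq_nil_iff]
      intro j hj hkj
      simp only [decide_eq_true_eq] at hkj
      rw [mem_splitOccs] at hj
      obtain ⟨h0, hlt, hp⟩ := hj
      apply hni
      rw [hm]
      -- mrkL <+: drop j.toNat, k ≤ j.toNat  ⟹ mrkL infix of drop k
      have hdrop : data.toList.drop j.toNat = (data.toList.drop k).drop (j.toNat - k) := by
        rw [List.drop_drop]; congr 1; omega
      rw [hdrop] at hp
      exact hp.isInfix.trans (List.drop_suffix _ _).isInfix
    rw [this]; rfl
  · obtain ⟨hkr, hp, hmin⟩ := PySem.Chars.findFrom_natCast_spec data.toList "00000001".toList k hk hneg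
    set r := PySem.Chars.findFrom data.toList "00000001".toList (k : Int) with hr
    have hr0 : 0 ≤ r := by omega
    have hlen : 8 ≤ (data.toList.drop r.toNat).length := by
      have h8 : ("00000001".toList).length = 8 := by decide
      have := hp.length_le
      omega
    have hrlt : r < data.toList.length := by
      rw [List.length_drop] at hlen
      omega
    have hrocc : r ∈ splitOccs data := by
      rw [mem_splitOccs]
      exact ⟨hr0, hrlt, hm ▸ hp⟩
    symm
    apply headD_filter_sorted _ _ _ (splitOccs_sorted data) hrocc hkr
    intro y hy hky
    rw [mem_splitOccs] at hy
    obtain ⟨hy0, hylt, hyp⟩ := hy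
    by_contra hlt'
    push Not at hlt'
    have : ¬ "00000001".toList <+: data.toList.drop y.toNat :=
      hmin y.toNat (by omega) (by omega)
    exact this (hm ▸ hyp)

-- `find(marker, t)` past the end of the string is -1
theorem findFrom_past (data : String) (t : Int) (ht : (data.toList.length : Int) < t) :
    PySem.Str.findFrom data "00000001" t = -1 := by
  rw [PySem.Str.findFrom_eq]
  simp only [PySem.Chars.findFrom]
  have h0 : (0:Int) ≤ data.toList.length := by positivity
  split_ifs with h1 h2 h3 <;> first | rfl | omega

-- `find(marker, c)` at a marker position returns that position itself
theorem findFrom_self (data : String) (c : Int) (hc : c ∈ splitOccs data) :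
    PySem.Str.findFrom data "00000001" c = c := by
  have h := (mem_splitOccs data c).mp hc
  have hcast : ((c.toNat : Nat) : Int) = c := by omega
  have := findFrom_eq_headD data c.toNat (by omega)
  rw [hcast] at this
  rw [this]
  exact headD_filter_sorted _ _ _ (splitOccs_sorted data) hc le_rfl
    (fun y _ hky => hky)

-- main loop correspondence: A's loop from an occurrence = B's walk over the index list
theorem main_loop (data : String) (fuel : Nat) (cur : Int) (rest : List Int)
    (hcur : cur ∈ splitOccs data)
    (hinv : rest.filter (fun i => cur + 16 ≤ i) = (splitOccs data).filter (fun i => cur + 16 ≤ i))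
    (hfuel : ((splitOccs data).filter (fun i => cur + 16 ≤ i)).length < fuel) :
    splitLoopA data fuel cur = splitEmit data cur rest := by
  induction fuel generalizing cur rest with
  | zero => omega
  | succ fuel ih =>
    have hc := (mem_splitOccs data cur).mp hcur
    rw [splitLoopA, splitEmit]
    rw [findFrom_self data cur hcur, hinv]
    dsimp only
    rw [if_neg (show ¬ (cur = -1) by omega)]
    rw [show cur + 8 * 2 = cur + 16 from by ring]
    by_cases hbig : data.toList.length < cur.toNat + 16
    · have hempty : (splitOccs data).filter (fun i => cur + 16 ≤ i) = [] := by
        rw [List.filter_eq_nil_iff]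
        intro j hj hkj
        have := (mem_splitOccs data j).mp hj
        simp only [decide_eq_true_eq] at hkj
        omega
      rw [hempty, findFrom_past data (cur + 16) (by omega)]
      simp
    · have hfind := findFrom_eq_headD data (cur.toNat + 16) (by omega)
      have hc16 : ((cur.toNat + 16 : Nat) : Int) = cur + 16 := by omega
      rw [hc16] at hfind
      cases hflt : (splitOccs data).filter (fun i => cur + 16 ≤ i) with
      | nil =>
        rw [hflt] at hfind
        rw [hfind]
        simp
      | cons j tl =>
        rw [hflt] at hfind
        simp only [List.headD_cons] at hfind
        have hj : j ∈ splitOccs data := List.mem_of_mem_filter (hflt ▸ List.mem_cons_self)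
        have hjc := (mem_splitOccs data j).mp hj
        have hjcur : cur + 16 ≤ j := by
          have := List.mem_filter.mp (hflt ▸ (List.mem_cons_self : j ∈ j :: tl))
          simpa using this.2
        rw [hfind]
        dsimp only
        rw [if_neg (show ¬ (j = -1) by omega),
            if_neg (show ¬ (PySem.Str.len data ≤ j) by rw [PySem.Str.len_eq]; omega)]
        congr 1
        have hsub : (splitOccs data).filter (fun i => j + 16 ≤ i)
            = ((splitOccs data).filter (fun i => cur + 16 ≤ i)).filter (fun i => j + 16 ≤ i) := by
          rw [List.filter_filter]
          apply List.filter_congr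
          intro x _
          by_cases hx : j + 16 ≤ x
          · simp [hx, show cur + 16 ≤ x by omega]
          · simp [hx]
        have htl : (splitOccs data).filter (fun i => j + 16 ≤ i)
            = tl.filter (fun i => j + 16 ≤ i) := by
          rw [hsub, hflt, List.filter_cons]
          simp [show ¬ (j + 16 ≤ j) by omega]
        apply ih j tl hj htl.symm
        have h1 := List.length_filter_le (fun i => j + 16 ≤ i) tl
        have h2 : ((splitOccs data).filter (fun i => j + 16 ≤ i)).length
            = (tl.filter (fun i => j + 16 ≤ i)).length := by rw [htl]
        rw [hflt] at hfuel
        simp only [List.length_cons] at hfuel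
        omega

-- the two ports agree on every input
theorem split_on_packages_eq_alt : ∀ (data : String),
    split_on_packages data = split_on_packages_alt data := by
  intro data
  unfold split_on_packages split_on_packages_alt
  have hocc0 : (splitOccs data).filter (fun i => (0:Int) ≤ i) = splitOccs data := by
    rw [List.filter_eq_self]
    intro j hj
    have := (mem_splitOccs data j).mp hj
    simp; omega
  have hfind0 : PySem.Str.findFrom data "00000001" (0 : Int) = (splitOccs data).headD (-1) := by
    have h := findFrom_eq_headD data 0 (by omega)
    simp only [Nat.cast_zero] at h
    rw [hocc0] at h
    exact h
  cases hocc : splitOccs data with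
  | nil =>
    rw [hocc] at hfind0
    rw [splitLoopA, hfind0]
    simp
  | cons c rest =>
    rw [hocc] at hfind0
    simp only [List.headD_cons] at hfind0
    have hcocc : c ∈ splitOccs data := hocc ▸ List.mem_cons_self
    have hcc := (mem_splitOccs data c).mp hcocc
    have hstep : splitLoopA data (data.toList.length + 1) 0 = splitLoopA data (data.toList.length + 1) c := by
      rw [splitLoopA, splitLoopA, hfind0, findFrom_self data c hcocc]
    have hlenocc : (splitOccs data).length ≤ data.toList.length := by
      have h2 := List.length_filter_le (fun i => PySem.Str.slice data (some i) (some (i + 8)) == "00000001") (PySem.List.pyRange 0 (PySem.Str.len data))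
      rw [PySem.List.length_pyRange_one, PySem.Str.len_eq] at h2
      unfold splitOccs
      rw [PySem.Str.len_eq]
      omega
    have hm := main_loop data (data.toList.length + 1) c (splitOccs data) hcocc rfl (by
      have h1 := List.length_filter_le (fun i => c + 16 ≤ i) (splitOccs data)
      omega)
    rw [hocc] at hm
    rw [hstep]
    dsimp only
    exact hm

-- ===== VERDICT (by name: the statement is the Claim_ definition above) =====
theorem split_on_packages_spec : Claim_equal_split_on_packages := by
  intro data _
  exact split_on_packages_eq_alt data
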